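-- pv_equiv track=rewrite | github.com/MUsommer/advent_of_code | day3.py | get_gamma_epsilon
-- ===== SOURCE A (Python) =====
-- def get_gamma_epsilon(data):
--     itm_len = len(data[0])
--     lst_len = len(data)
--     lst_len_mid = int(lst_len / 2)
--
--     gamma = ""
--     epsilon = ""
--
--     for i in range(0, itm_len):
--         count_1 = sum([int(x[i]) for x in data])
--
--         if count_1 > lst_len_mid:
--             gamma += "1"
--             epsilon += "0"
--         else:
--             gamma += "0"
--             epsilon += "1"
--     return gamma, epsilon
-- ===== SOURCE B (Python) =====
-- def get_gamma_epsilon(data):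
--     itm_len = len(data[0])
--     half = int(len(data) / 2)
--     # one row-major pass: accumulate the digit sum of every column at once
--     counts = [0] * itm_len
--     for x in data:
--         counts = [c + int(ch) for c, ch in zip(counts, x)]
--     # second pass: interpret each column count against the strict-majority threshold
--     gamma = ""
--     epsilon = ""
--     for c in counts:
--         if c > half:
--             gamma += "1"
--             epsilon += "0"
--         else:
--             gamma += "0"
--             epsilon += "1"
--     return gamma, epsilon
-- ===== Notes on version B (the rewrite author's own statement) =====
-- stated objective: alternative
-- what changed: A recomputes a full column scan (a list comprehension over all rows plus sum) for every bit position; B makes one row-major pass accumulating all column counts in a counts list via zip, then a separate pass over counts builds gamma/epsilon.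
import Mathlib
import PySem

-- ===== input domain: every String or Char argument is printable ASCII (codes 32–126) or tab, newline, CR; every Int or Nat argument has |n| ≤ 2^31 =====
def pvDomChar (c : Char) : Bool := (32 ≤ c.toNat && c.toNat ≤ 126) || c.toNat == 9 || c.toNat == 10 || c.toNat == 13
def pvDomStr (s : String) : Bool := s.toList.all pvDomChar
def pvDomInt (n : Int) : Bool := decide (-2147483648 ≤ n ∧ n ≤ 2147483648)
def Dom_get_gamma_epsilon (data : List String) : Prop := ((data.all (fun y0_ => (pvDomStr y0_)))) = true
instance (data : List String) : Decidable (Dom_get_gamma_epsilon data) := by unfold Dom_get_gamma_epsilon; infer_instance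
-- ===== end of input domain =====

-- B replaces A's per-column re-scan of all rows (nested passes, row indexed once per column)
-- by ONE row-major accumulation pass into a counts list plus a separate interpretation pass
-- over counts; objective: alternative decomposition (same asymptotic cost, each char read once).

-- ===== PORT A =====
-- int(x[i]) for a string x and Int index i (A's inner expression); total form, junk 0 outside Pre_
def pvIntAt (x : String) (i : Int) : Int :=
  ((PySem.Str.pyGet? x i).bind (fun c => PySem.Int.ofChars? [c])).getD 0

def get_gamma_epsilon (data : List String) : String × String :=
  let itm_len : Int := PySem.Str.len ((PySem.List.pyGet? data 0).getD "")
  let lst_len : Int := PySem.List.len data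
  let lst_len_mid : Int := PySem.Int.truncdiv lst_len 2
  (PySem.List.pyRange 0 itm_len 1).foldl
    (fun ge i =>
      let count_1 : Int := (data.map (fun x => pvIntAt x i)).sum
      if count_1 > lst_len_mid then (ge.1 ++ "1", ge.2 ++ "0")
      else (ge.1 ++ "0", ge.2 ++ "1"))
    ("", "")

-- ===== PORT B =====
-- int(ch) for a single char ch (B's inner expression); total form, junk 0 outside Pre_
def pvIntCh (ch : Char) : Int := (PySem.Int.ofChars? [ch]).getD 0

def get_gamma_epsilon_alt (data : List String) : String × String :=
  let itm_len : Int := PySem.Str.len ((PySem.List.pyGet? data 0).getD "")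
  let half : Int := PySem.Int.truncdiv (PySem.List.len data) 2
  -- one row-major pass: counts = [c + int(ch) for c, ch in zip(counts, x)]
  let counts : List Int := data.foldl
    (fun cs x => List.zipWith (fun c ch => c + pvIntCh ch) cs x.toList)
    (List.replicate itm_len.toNat 0)
  -- second pass: interpret each column count
  counts.foldl
    (fun ge c =>
      if c > half then (ge.1 ++ "1", ge.2 ++ "0")
      else (ge.1 ++ "0", ge.2 ++ "1"))
    ("", "")

-- ===== PRECONDITION & SPEC =====
-- Pre_ excludes exactly the inputs where the Python A raises: empty data (IndexError on
-- data[0]), a row shorter than the first row (IndexError on x[i]), and a non-digit character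
-- in the first len(data[0]) positions of a row (ValueError in int(x[i])).
def Pre_get_gamma_epsilon (data : List String) : Prop :=
  data ≠ [] ∧ ∀ x ∈ data,
    (data.headD "").toList.length ≤ x.toList.length ∧
    (x.toList.take (data.headD "").toList.length).all Char.isDigit = true
instance (data : List String) : Decidable (Pre_get_gamma_epsilon data) := by
  unfold Pre_get_gamma_epsilon; infer_instance

def pvWitness_get_gamma_epsilon : List String := ["1", "0"]

def Spec_get_gamma_epsilon (data : List String) (out : String × String) : Prop :=
  out = get_gamma_epsilon_alt data
instance (data : List String) (out : String × String) : Decidable (Spec_get_gamma_epsilon data out) := by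
  unfold Spec_get_gamma_epsilon; infer_instance

-- ===== CLAIM (what is proved, stated in full; the proofs are below) =====
def Claim_equal_get_gamma_epsilon : Prop :=
  ∀ (data : List String), Dom_get_gamma_epsilon data → Pre_get_gamma_epsilon data →
    Spec_get_gamma_epsilon data (get_gamma_epsilon data)

-- ===== LEMMAS AND PROOFS =====

-- The accumulation pass of B computes, in column k, the sum A computes there by re-scanning.
theorem pv_counts_spec (data : List String) :
    ∀ (cs : List Int), (∀ x ∈ data, cs.length ≤ x.toList.length) →
    data.foldl (fun cs x => List.zipWith (fun c ch => c + pvIntCh ch) cs x.toList) cs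
      = (List.range cs.length).map
          (fun k => cs.getD k 0 + (data.map (fun x => pvIntAt x (k : Int))).sum) := by
  induction data with
  | nil =>
    intro cs _
    simp only [List.foldl_nil, List.map_nil, List.sum_nil, add_zero]
    refine (List.ext_getElem (by simp) ?_).symm
    intro k h1 h2
    simp [List.getD_eq_getElem?_getD, List.getElem?_eq_getElem h2]
  | cons x rest ih =>
    intro cs hlen
    have hx : cs.length ≤ x.toList.length := hlen x (by simp)
    have hcs' : (List.zipWith (fun c ch => c + pvIntCh ch) cs x.toList).length = cs.length := by
      rw [List.length_zipWith]; omega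
    rw [List.foldl_cons, ih _ (by intro y hy; rw [hcs']; exact hlen y (by simp [hy]))]
    rw [hcs']
    refine List.map_congr_left ?_
    intro k hk
    rw [List.mem_range] at hk
    have hk2 : k < x.toList.length := lt_of_lt_of_le hk hx
    have hz : (List.zipWith (fun c ch => c + pvIntCh ch) cs x.toList).getD k 0
        = cs.getD k 0 + pvIntCh x.toList[k] := by
      rw [List.getD_eq_getElem?_getD, List.getElem?_zipWith]
      simp [List.getElem?_eq_getElem hk2, List.getD_eq_getElem?_getD, List.getElem?_eq_getElem hk]
    have hA : pvIntAt x (k : Int) = pvIntCh x.toList[k] := by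
      simp [pvIntAt, pvIntCh, List.getElem?_eq_getElem hk2]
    simp only [hz, List.map_cons, List.sum_cons, hA]
    ring

-- ===== VERDICT (by name: the statement is the Claim_ definition above) =====
theorem get_gamma_epsilon_spec : Claim_equal_get_gamma_epsilon := by
  intro data _ hpre
  obtain ⟨hne, hall⟩ := hpre
  unfold Spec_get_gamma_epsilon get_gamma_epsilon get_gamma_epsilon_alt
  -- name the head string and the column count
  have hd0 : PySem.List.pyGet? data 0 = some (data.headD "") := by
    cases data with
    | nil => exact absurd rfl hne
    | cons h t => rw [PySem.List.pyGet?_zero_cons]; rfl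
  simp only [hd0, Option.getD_some, PySem.Str.len_eq, Int.toNat_natCast]
  rw [pv_counts_spec data (List.replicate ((data.headD "").toList.length) 0)
        (by intro x hx; rw [List.length_replicate]; exact (hall x hx).1)]
  rw [List.length_replicate, PySem.List.pyRange_zero_nat, List.foldl_map, List.foldl_map]
  refine (PySem.List.foldl_congr_mem _ _ _ _ ?_).symm
  intro acc k hk
  rw [List.mem_range] at hk
  simp
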